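-- pv_equiv track=rewrite | github.com/pebosi/ipfire.org-bootstrap3 | webapp/backend/tracker.py | decode_hex
-- ===== SOURCE A (Python) =====
-- def decode_hex(s):
-- 	ret = []
-- 	for c in s:
-- 		for i in range(256):
-- 			if not c == chr(i):
-- 				continue
--
-- 			ret.append("%02x" % i)
--
-- 	return "".join(ret)
-- ===== SOURCE B (Python) =====
-- def decode_hex(s):
--     return s.encode("latin-1", errors="ignore").hex()
-- ===== Notes on version B (the rewrite author's own statement) =====
-- stated objective: faster
-- what changed: Replaces the per-character linear scan over range(256) by a single latin-1 encode (errors='ignore' drops chars with ord>=256, matching A's implicit skip) followed by bytes.hex().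
import Mathlib
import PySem

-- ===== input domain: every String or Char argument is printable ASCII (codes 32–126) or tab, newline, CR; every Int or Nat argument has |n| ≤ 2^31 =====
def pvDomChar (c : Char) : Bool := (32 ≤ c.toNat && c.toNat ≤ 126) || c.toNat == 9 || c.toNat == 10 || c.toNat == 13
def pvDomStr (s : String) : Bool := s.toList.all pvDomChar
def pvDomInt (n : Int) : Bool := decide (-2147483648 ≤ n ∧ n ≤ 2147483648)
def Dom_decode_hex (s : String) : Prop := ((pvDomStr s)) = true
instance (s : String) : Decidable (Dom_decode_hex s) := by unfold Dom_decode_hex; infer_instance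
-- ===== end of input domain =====

-- B replaces A's per-character scan over range(256) by one latin-1-style filter + hex pass (constant-factor faster).


-- one lowercase hex digit (0 ≤ n < 16)
def pvHexDigit (n : Nat) : Char := if n < 10 then Char.ofNat (48 + n) else Char.ofNat (87 + n)

-- ===== PORT A =====
-- "%02x" % n for 0 ≤ n < 256
def pvHex2 (n : Nat) : String := String.ofList [pvHexDigit (n / 16), pvHexDigit (n % 16)]

def decode_hex (s : String) : String :=
  let ret := s.toList.foldl (fun ret c =>
    (PySem.List.pyRange 0 256 1).foldl (fun ret i =>
      if !(c == Char.ofNat i.toNat) then ret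
      else ret ++ [pvHex2 i.toNat]) ret) []
  PySem.Str.join "" ret

-- ===== PORT B =====
-- s.encode('latin-1', errors='ignore').hex(): keep the chars with code < 256, two hex digits per byte
def decode_hex_alt (s : String) : String :=
  String.ofList (((s.toList.filter (fun c => c.toNat < 256)).map
    (fun c => [pvHexDigit (c.toNat / 16), pvHexDigit (c.toNat % 16)])).flatten)

-- ===== PRECONDITION & SPEC =====
def Spec_decode_hex (s : String) (out : String) : Prop := out = decode_hex_alt s
instance (s : String) (out : String) : Decidable (Spec_decode_hex s out) := by unfold Spec_decode_hex; infer_instance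

-- ===== CLAIM (what is proved, stated in full; the proofs are below) =====
def Claim_equal_decode_hex : Prop := ∀ (s : String), Dom_decode_hex s → Spec_decode_hex s (decode_hex s)

-- ===== LEMMAS AND PROOFS =====

theorem pv_filter_range (m n : Nat) :
    (List.range n).filter (fun k => m == k) = if m < n then [m] else [] := by
  induction n with
  | zero => simp
  | succ n ih =>
    rw [List.range_succ, List.filter_append, ih]
    by_cases h2 : m = n
    · subst h2; simp
    · have hne : (m == n) = false := by simp [h2]
      by_cases h : m < n <;> simp [List.filter, hne, h] <;> omega

theorem pv_toNat_ofNat (k : Nat) (h : k < 256) : (Char.ofNat k).toNat = k := by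
  have hv : Nat.isValidChar k := Or.inl (by omega)
  rw [Char.ofNat, dif_pos hv]
  simp [Char.toNat, Char.ofNatAux]

theorem pv_beq_ofNat (c : Char) (k : Nat) (hk : k < 256) :
    (c == Char.ofNat k) = (c.toNat == k) := by
  by_cases h : c.toNat = k
  · have hc : c = Char.ofNat k := by
      apply Char.ext
      have h2 := pv_toNat_ofNat k hk
      simp only [Char.toNat] at h h2
      exact UInt32.toNat_inj.mp (by omega)
    rw [hc]
    simp [pv_toNat_ofNat k hk]
  · have hne : c ≠ Char.ofNat k := fun he => h (he ▸ pv_toNat_ofNat k hk)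
    simp [hne, h]

theorem pv_inner (c : Char) (acc : List String) (h : c.toNat < 256) :
    (PySem.List.pyRange 0 256 1).foldl (fun ret i =>
      if !(c == Char.ofNat i.toNat) then ret
      else ret ++ [pvHex2 i.toNat]) acc = acc ++ [pvHex2 c.toNat] := by
  rw [PySem.List.pyRange_one, List.foldl_map]
  have hcongr : ∀ k ∈ List.range ((256 - 0 : Int)).toNat, ∀ ret : List String,
      (if !(c == Char.ofNat ((0 + (k : Int)).toNat)) then ret else ret ++ [pvHex2 ((0 + (k : Int)).toNat)])
      = (if (c.toNat == k) then ret ++ [pvHex2 k] else ret) := by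
    intro k hk ret
    have hk' : k < 256 := by simpa using List.mem_range.mp hk
    have hcast : ((0 + (k : Int)).toNat) = k := by omega
    rw [hcast, pv_beq_ofNat c k hk']
    cases hb : (c.toNat == k) <;> simp
  rw [PySem.List.foldl_congr_mem' _ _ _ _ hcongr]
  rw [PySem.List.foldl_append_if (fun k => c.toNat == k) pvHex2]
  have h256 : ((256 - 0 : Int)).toNat = 256 := by decide
  rw [h256, pv_filter_range]
  simp [h]

theorem pv_join_nil_flatten {α : Type} (xss : List (List α)) :
    List.intercalate [] xss = xss.flatten := by
  induction xss with
  | nil => rfl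
  | cons x xs ih =>
    cases xs with
    | nil => simp [List.intercalate]
    | cons y ys =>
      rw [List.intercalate] at ih ⊢
      simp only [List.intersperse, List.flatten_cons, List.nil_append] at ih ⊢
      rw [ih]

-- ===== VERDICT (by name: the statement is the Claim_ definition above) =====
theorem decode_hex_spec : Claim_equal_decode_hex := by
  intro s hd
  unfold Spec_decode_hex decode_hex decode_hex_alt
  have hlt : ∀ c ∈ s.toList, c.toNat < 256 := by
    intro c hc
    have hch := List.all_eq_true.mp hd c hc
    revert hch
    simp [pvDomChar]
    omega
  have hcongr : ∀ c ∈ s.toList, ∀ ret : List String,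
      ((PySem.List.pyRange 0 256 1).foldl (fun ret i =>
        if !(c == Char.ofNat i.toNat) then ret
        else ret ++ [pvHex2 i.toNat]) ret) = ret ++ [pvHex2 c.toNat] := by
    intro c hc ret
    exact pv_inner c ret (hlt c hc)
  dsimp only
  rw [PySem.List.foldl_congr_mem' _ _ _ _ hcongr]
  rw [PySem.List.foldl_append_singleton_eq_map]
  rw [List.filter_eq_self.mpr (by intro c hc; simpa using hlt c hc)]
  have : ∀ (a b : String), a.toList = b.toList → a = b := by
    intro a b h; simpa using congrArg String.ofList h
  apply this
  simp only [PySem.Str.toList_join, List.nil_append, List.map_map]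
  have : PySem.Chars.join "".toList = List.intercalate ([] : List Char) := rfl
  rw [this]
  rw [pv_join_nil_flatten]
  simp [Function.comp_def, pvHex2]
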